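-- pv_equiv track=rewrite | github.com/AlecFaye/Coding-Practice | September 2020/September 4/Calculator.py | convert_negatives
-- ===== SOURCE A (Python) =====
-- def convert_negatives(exp):
--     new_expression = ""
--     skip = 0
--
--     for index in range(len(exp)):
--         if index + skip < len(exp):
--             if exp[index + skip] == "-":
--                 if index + skip + 1 < len(exp):
--                     if exp[index + skip + 1] == "-":
--                         new_expression += "+"
--                         skip += 1
--                     else:
--                         new_expression += exp[index + skip]
--             else:
--                 new_expression += exp[index + skip]
--
--     return new_expression
-- ===== SOURCE B (Python) =====
-- def convert_negatives(exp):
--     out = []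
--     i = 0
--     n = len(exp)
--     while i < n:
--         if exp[i] == "-":
--             j = i
--             while j < n and exp[j] == "-":
--                 j += 1
--             k = j - i
--             out.append("+" * (k // 2))
--             if k % 2 == 1 and j < n:
--                 out.append("-")
--             i = j
--         else:
--             out.append(exp[i])
--             i += 1
--     return "".join(out)
-- ===== Notes on version B (the rewrite author's own statement) =====
-- stated objective: idiomatic
-- what changed: B scans maximal runs of '-' with an inner run-counting loop and emits '+'*(k//2) plus a trailing '-' only when the odd run is not at the end of the string, replacing A's positional for-loop with a skip counter and per-character pair lookahead.
import Mathlib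
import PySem

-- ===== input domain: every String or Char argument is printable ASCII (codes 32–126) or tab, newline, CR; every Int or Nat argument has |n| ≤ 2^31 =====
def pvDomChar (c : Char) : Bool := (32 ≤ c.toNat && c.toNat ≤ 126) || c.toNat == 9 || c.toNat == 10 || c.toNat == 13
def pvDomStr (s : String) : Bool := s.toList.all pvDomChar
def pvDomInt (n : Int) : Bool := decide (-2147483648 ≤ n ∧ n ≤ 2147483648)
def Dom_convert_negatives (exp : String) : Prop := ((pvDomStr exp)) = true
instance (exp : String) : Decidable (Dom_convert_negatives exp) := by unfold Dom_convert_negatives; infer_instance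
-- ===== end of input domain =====

-- B replaces A's positional for-loop with a skip counter by a scan over maximal runs of '-'
-- (idiomatic run-grouping); same return value, no speed claim proved.

-- ===== PORT A =====
-- A's loop: for index in range(len(exp)) with state (new_expression, skip); each exp[i] access
-- is guarded in range, so List.getD is exact for Python's indexing here.
def convAStep (cs : List Char) (n : Nat) (st : List Char × Nat) (index : Nat) : List Char × Nat :=
  let acc := st.1
  let skip := st.2
  if index + skip < n then
    if cs.getD (index + skip) ' ' = '-' then
      if index + skip + 1 < n then
        if cs.getD (index + skip + 1) ' ' = '-' then
          (acc ++ ['+'], skip + 1)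
        else
          (acc ++ [cs.getD (index + skip) ' '], skip)
      else (acc, skip)
    else (acc ++ [cs.getD (index + skip) ' '], skip)
  else (acc, skip)

def convert_negatives (exp : String) : String :=
  let cs := exp.toList
  let n := cs.length
  String.mk ((List.range n).foldl (convAStep cs n) ([], 0)).1

-- ===== PORT B =====
-- inner `while j < n and exp[j] == '-'` loop of Source B: count the dash run, return (count, rest)
def takeDashes : List Char → Nat × List Char
  | [] => (0, [])
  | c :: rest =>
    if c = '-' then
      let p := takeDashes rest
      (p.1 + 1, p.2)
    else (0, c :: rest)

theorem takeDashes_len (cs : List Char) : (takeDashes cs).2.length ≤ cs.length := by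
  induction cs with
  | nil => simp [takeDashes]
  | cons c rest ih =>
    simp only [takeDashes]
    split
    · exact Nat.le_succ_of_le ih
    · simp

-- outer while-loop of Source B
def convB : List Char → List Char
  | [] => []
  | c :: rest =>
    if c = '-' then
      let p := takeDashes rest
      let k := p.1 + 1
      (List.replicate (k / 2) '+') ++ (if k % 2 = 1 ∧ p.2 ≠ [] then ['-'] else []) ++ convB p.2
    else
      c :: convB rest
  termination_by cs => cs.length
  decreasing_by
  · exact Nat.lt_succ_of_le (takeDashes_len rest)
  · simp

def convert_negatives_alt (exp : String) : String :=
  String.mk (convB exp.toList)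

-- ===== PRECONDITION & SPEC =====
def Spec_convert_negatives (exp : String) (out : String) : Prop := out = convert_negatives_alt exp
instance (exp : String) (out : String) : Decidable (Spec_convert_negatives exp out) := by unfold Spec_convert_negatives; infer_instance

-- ===== CLAIM (what is proved, stated in full; the proofs are below) =====
def Claim_equal_convert_negatives : Prop := ∀ (exp : String), Dom_convert_negatives exp → Spec_convert_negatives exp (convert_negatives exp)

-- ===== LEMMAS AND PROOFS =====

-- intermediate characterisation: consume one char, or a '--' pair, from the front
def pairRec : List Char → List Char
  | [] => []
  | [c] => if c = '-' then [] else [c]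
  | c :: d :: rest =>
    if c = '-' then
      if d = '-' then '+' :: pairRec rest
      else '-' :: pairRec (d :: rest)
    else c :: pairRec (d :: rest)

theorem pairRec_cons_ne (c : Char) (t : List Char) (h : c ≠ '-') :
    pairRec (c :: t) = c :: pairRec t := by
  cases t with
  | nil => simp [pairRec, h]
  | cons d r => simp [pairRec, h]

-- A's loop is the identity once the position is past the end
theorem foldl_stepA_id (cs : List Char) (n : Nat) :
    ∀ (m i : Nat) (acc : List Char) (skip : Nat), n ≤ i + skip →
      (List.range' i m).foldl (convAStep cs n) (acc, skip) = (acc, skip) := by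
  intro m
  induction m with
  | zero => intro i acc skip _; simp
  | succ m ih =>
    intro i acc skip h
    rw [List.range'_succ, List.foldl_cons]
    have hg : ¬ i + skip < n := by omega
    simp only [convAStep, hg, if_false]
    exact ih (i + 1) acc skip (by omega)

-- main invariant: with p = i + skip and enough iterations left, the loop appends pairRec of the tail
theorem foldl_stepA (cs : List Char) :
    ∀ (m i skip : Nat) (acc : List Char),
      i + skip ≤ cs.length → cs.length ≤ m + i + skip →
      ((List.range' i m).foldl (convAStep cs cs.length) (acc, skip)).1
        = acc ++ pairRec (cs.drop (i + skip)) := by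
  intro m
  induction m with
  | zero =>
    intro i skip acc h1 h2
    have hp : i + skip = cs.length := by omega
    simp [hp, pairRec]
  | succ m ih =>
    intro i skip acc h1 h2
    by_cases hp : i + skip < cs.length
    · have hdrop : cs.drop (i + skip) = cs[i + skip] :: cs.drop (i + skip + 1) :=
        List.drop_eq_getElem_cons hp
      have hgetD : cs.getD (i + skip) ' ' = cs[i + skip] := List.getD_eq_getElem cs ' ' hp
      rw [List.range'_succ, List.foldl_cons]
      simp only [convAStep, hp, if_true, hgetD]
      by_cases hc : cs[i + skip] = '-'
      · simp only [hc, if_true]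
        by_cases hn : i + skip + 1 < cs.length
        · have hdrop2 : cs.drop (i + skip + 1) = cs[i + skip + 1] :: cs.drop (i + skip + 2) :=
            List.drop_eq_getElem_cons hn
          have hgetD2 : cs.getD (i + skip + 1) ' ' = cs[i + skip + 1] :=
            List.getD_eq_getElem cs ' ' hn
          simp only [hn, if_true, hgetD2]
          by_cases hd : cs[i + skip + 1] = '-'
          · simp only [hd, if_true]
            have := ih (i + 1) (skip + 1) (acc ++ ['+']) (by omega) (by omega)
            rw [show i + 1 + (skip + 1) = i + skip + 2 by omega] at this
            rw [this, hdrop, hdrop2, hc, hd]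
            simp [pairRec]
          · simp only [hd, if_false]
            have := ih (i + 1) skip (acc ++ ['-']) (by omega) (by omega)
            rw [show i + 1 + skip = i + skip + 1 by omega] at this
            rw [this, hdrop, hdrop2, hc]
            simp [pairRec, hd]
        · -- trailing dash at the very end: dropped
          have hlast : i + skip + 1 = cs.length := by omega
          simp only [hn, if_false]
          have := ih (i + 1) skip acc (by omega) (by omega)
          rw [show i + 1 + skip = i + skip + 1 by omega] at this
          rw [this, hdrop, hc]
          have : cs.drop (i + skip + 1) = [] := by
            apply List.drop_eq_nil_of_le; omega
          simp [this, pairRec]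
      · simp only [hc, if_false]
        have := ih (i + 1) skip (acc ++ [cs[i + skip]]) (by omega) (by omega)
        rw [show i + 1 + skip = i + skip + 1 by omega] at this
        rw [this, hdrop, pairRec_cons_ne _ _ hc]
        simp
    · have hp' : i + skip = cs.length := by omega
      rw [foldl_stepA_id cs cs.length (m + 1) i acc skip (by omega)]
      simp [hp', pairRec]

theorem convA_eq_pairRec (cs : List Char) :
    ((List.range cs.length).foldl (convAStep cs cs.length) ([], 0)).1 = pairRec cs := by
  have := foldl_stepA cs cs.length 0 0 [] (by omega) (by omega)
  simpa [List.range_eq_range'] using this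

-- takeDashes decomposition
theorem takeDashes_spec (cs : List Char) :
    cs = List.replicate (takeDashes cs).1 '-' ++ (takeDashes cs).2 ∧
      ∀ d t, (takeDashes cs).2 = d :: t → d ≠ '-' := by
  induction cs with
  | nil => simp [takeDashes]
  | cons c rest ih =>
    by_cases hc : c = '-'
    · simp only [takeDashes, hc, if_true]
      refine ⟨?_, fun d t h => ih.2 d t h⟩
      conv_lhs => rw [ih.1]
      simp [List.replicate_succ]
    · simp only [takeDashes, hc, if_false]
      exact ⟨by simp, fun d t h => by cases h; exact hc⟩

-- pairRec on a dash-run of length k followed by a non-dash remainder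
theorem pairRec_dashes :
    ∀ (k : Nat) (r : List Char), (∀ d t, r = d :: t → d ≠ '-') →
      pairRec (List.replicate k '-' ++ r)
        = List.replicate (k / 2) '+' ++ (if k % 2 = 1 ∧ r ≠ [] then ['-'] else []) ++ pairRec r := by
  intro k
  induction k using Nat.strong_induction_on with
  | _ k ih =>
    intro r hr
    match k with
    | 0 => simp
    | 1 =>
      cases r with
      | nil => simp [pairRec]
      | cons d t =>
        have hd := hr d t rfl
        simp [pairRec, hd, pairRec_cons_ne d t hd]
    | (m + 2) =>
      have : List.replicate (m + 2) '-' ++ r = '-' :: '-' :: (List.replicate m '-' ++ r) := by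
        simp [List.replicate_succ]
      rw [this]
      have hrec := ih m (by omega) r hr
      simp only [pairRec, if_true, hrec]
      have h2 : (m + 2) / 2 = m / 2 + 1 := by omega
      have h3 : (m + 2) % 2 = m % 2 := by omega
      rw [h2, h3, List.replicate_succ]
      simp

theorem convB_eq_pairRec_aux : ∀ (n : Nat) (cs : List Char), cs.length ≤ n → convB cs = pairRec cs := by
  intro n
  induction n with
  | zero =>
    intro cs h
    have : cs = [] := List.eq_nil_of_length_eq_zero (by omega)
    subst this; simp [convB, pairRec]
  | succ n ih =>
    intro cs h
    cases cs with
    | nil => simp [convB, pairRec]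
    | cons c rest =>
      by_cases hc : c = '-'
      · have hs := takeDashes_spec rest
        rw [convB]
        simp only [hc, if_true]
        rw [ih (takeDashes rest).2 (by have := takeDashes_len rest; simp at h; omega)]
        have hdecomp : ('-' : Char) :: rest
            = List.replicate ((takeDashes rest).1 + 1) '-' ++ (takeDashes rest).2 := by
          conv_lhs => rw [hs.1]
          simp [List.replicate_succ]
        subst hc
        rw [hdecomp, pairRec_dashes ((takeDashes rest).1 + 1) (takeDashes rest).2 hs.2]
      · rw [convB]
        simp only [hc, if_false]
        rw [ih rest (by simp at h; omega), pairRec_cons_ne c rest hc]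

theorem convB_eq_pairRec (cs : List Char) : convB cs = pairRec cs :=
  convB_eq_pairRec_aux cs.length cs (le_refl _)

-- ===== VERDICT (by name: the statement is the Claim_ definition above) =====
theorem convert_negatives_spec : Claim_equal_convert_negatives := by
  intro exp _
  show String.mk ((List.range exp.toList.length).foldl (convAStep exp.toList exp.toList.length) ([], 0)).1
      = String.mk (convB exp.toList)
  rw [convA_eq_pairRec, convB_eq_pairRec]
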